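-- pv_equiv track=rewrite | github.com/AlbertMargaryan/Python_CPS109_Problems_Solution | main.py | words_with_letters
-- ===== SOURCE A (Python) =====
-- def words_with_letters(words, letters):
--     result = []
--
--     for word in words:
--         tempWord = word
--         count = len(letters)
--
--         for letter in letters:
--             if tempWord.find(letter) < 0:
--                 break
--             elif tempWord.find(letter) >= 0:
--                 tempWord = tempWord[int(tempWord.find(letter)) + 1:]
--                 count -= 1
--         if count == 0:
--             result.append(word)
--
--     return result
-- ===== SOURCE B (Python) =====
-- def words_with_letters(words, letters):
--     result = []
--     for word in words:
--         # occurrence index: char -> ascending list of its positions in word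
--         pos = {}
--         for i, ch in enumerate(word):
--             pos.setdefault(ch, []).append(i)
--         ok = True
--         nxt = 0
--         for ch in letters:
--             idx = pos.get(ch, [])
--             if not idx or idx[-1] < nxt:
--                 ok = False
--                 break
--             # binary search (bisect_left) for the first position >= nxt
--             lo, hi = 0, len(idx)
--             while lo < hi:
--                 mid = (lo + hi) // 2
--                 if idx[mid] < nxt:
--                     lo = mid + 1
--                 else:
--                     hi = mid
--             nxt = idx[lo] + 1
--         if ok:
--             result.append(word)
--     return result
-- ===== Notes on version B (the rewrite author's own statement) =====
-- stated objective: alternative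
-- what changed: replaces A's repeated str.find plus slice-and-copy greedy scan by a different data structure: per word an occurrence index (char -> ascending position list) is built once, and each letter advances via a hand-written binary search (bisect_left) for the first occurrence at or after the current position
import Mathlib
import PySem

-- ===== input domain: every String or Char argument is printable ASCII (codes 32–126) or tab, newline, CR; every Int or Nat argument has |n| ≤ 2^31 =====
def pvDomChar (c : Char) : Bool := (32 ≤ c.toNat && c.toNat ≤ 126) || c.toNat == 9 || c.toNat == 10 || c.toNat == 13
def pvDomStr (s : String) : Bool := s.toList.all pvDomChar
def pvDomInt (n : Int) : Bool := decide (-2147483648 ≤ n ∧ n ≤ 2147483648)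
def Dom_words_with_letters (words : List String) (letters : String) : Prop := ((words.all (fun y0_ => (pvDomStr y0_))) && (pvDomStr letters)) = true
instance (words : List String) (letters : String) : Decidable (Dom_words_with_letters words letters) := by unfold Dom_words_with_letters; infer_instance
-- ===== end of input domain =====

-- B replaces A's find-and-slice greedy scan by a different data structure: a per-word
-- occurrence index (char -> ascending position list) walked with a hand-written binary search.

-- ===== PORT A =====
-- A's inner 'for letter in letters' loop: tempWord/count state; 'break' returns the current count
def pvALoop (temp : List Char) (count : Int) : List Char → Int
  | [] => count
  | c :: rest =>
    if PySem.Chars.find temp [c] < 0 then count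
    else pvALoop (PySem.List.slice temp (some (PySem.Chars.find temp [c] + 1)) none) (count - 1) rest

def words_with_letters (words : List String) (letters : String) : List String :=
  words.foldl (fun result word =>
    if pvALoop word.toList (PySem.Str.len letters) letters.toList = 0 then result ++ [word]
    else result) []

-- ===== PORT B =====
-- 'pos.setdefault(ch, []).append(i)' over enumerate(word): char -> ascending list of positions
def pvBuildPos (w : List Char) : PySem.Dict Char (List Int) :=
  (PySem.List.enumerate w).foldl (fun d p => d.modify p.2 [] (· ++ [p.1])) PySem.Dict.empty

-- Source B's hand-written 'while lo < hi' binary search; idx[mid] as List.getD (mid is a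
-- nonnegative in-range Python index throughout)
def pvBisect (idx : List Int) (v : Int) (lo hi : Nat) : Nat :=
  if lo < hi then
    if idx.getD ((lo + hi) / 2) 0 < v then pvBisect idx v ((lo + hi) / 2 + 1) hi
    else pvBisect idx v lo ((lo + hi) / 2)
  else lo
termination_by hi - lo
decreasing_by all_goals omega

-- Source B's 'for ch in letters' loop: nxt pointer, guard 'not idx or idx[-1] < nxt', then bisect;
-- idx[-1] via pyGetD (guarded nonempty), idx[lo] as List.getD (lo is in range when reached)
def pvBLoop (pos : PySem.Dict Char (List Int)) (nxt : Int) : List Char → Bool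
  | [] => true
  | c :: ls =>
    let idx := pos.getD c []
    if idx = [] ∨ PySem.List.pyGetD idx (-1) 0 < nxt then false
    else pvBLoop pos (idx.getD (pvBisect idx nxt 0 idx.length) 0 + 1) ls

def words_with_letters_alt (words : List String) (letters : String) : List String :=
  words.foldl (fun result word =>
    if pvBLoop (pvBuildPos word.toList) 0 letters.toList then result ++ [word]
    else result) []

-- ===== PRECONDITION & SPEC =====
def Spec_words_with_letters (words : List String) (letters : String) (out : List String) : Prop := out = words_with_letters_alt words letters
instance (words : List String) (letters : String) (out : List String) : Decidable (Spec_words_with_letters words letters out) := by unfold Spec_words_with_letters; infer_instance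

-- ===== CLAIM (what is proved, stated in full; the proofs are below) =====
def Claim_equal_words_with_letters : Prop := ∀ (words : List String) (letters : String), Dom_words_with_letters words letters → Spec_words_with_letters words letters (words_with_letters words letters)

-- ===== LEMMAS AND PROOFS =====

-- reference predicate both per-word tests are proved equal to: letters is a subsequence of the word
def pvIsSubseq : List Char → List Char → Bool
  | [], _ => true
  | _ :: _, [] => false
  | c :: ls, w :: ws => if w = c then pvIsSubseq ls ws else pvIsSubseq (c :: ls) ws

-- ---------- A-side: A's loop counts down to 0 exactly when pvIsSubseq holds ----------

lemma pv_singleton_prefix (c : Char) (l : List Char) : [c] <+: l ↔ ∃ t, l = c :: t := by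
  rw [List.cons_prefix_iff]; constructor
  · rintro ⟨w, hw, -⟩; exact ⟨w, hw⟩
  · rintro ⟨t, rfl⟩; exact ⟨t, rfl, List.nil_prefix⟩

lemma pv_mem_iff_infix (c : Char) (s : List Char) : c ∈ s ↔ [c] <:+: s := by
  constructor
  · intro h; obtain ⟨p, t, rfl⟩ := List.append_of_mem h; exact ⟨p, t, by simp⟩
  · intro h; exact List.singleton_sublist.mp h.sublist

-- str.find of a single character in a cons: first occurrence, shifted by one
lemma pv_find_singleton_cons (w c : Char) (ws : List Char) :
    PySem.Chars.find (w :: ws) [c] =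
      if w = c then 0
      else if PySem.Chars.find ws [c] = -1 then -1 else PySem.Chars.find ws [c] + 1 := by
  by_cases hwc : w = c
  · subst hwc
    rw [if_pos rfl]
    have hinf : [w] <:+: (w :: ws) := (pv_mem_iff_infix w _).mp (List.mem_cons_self)
    have h0 : 0 ≤ PySem.Chars.find (w :: ws) [w] := (PySem.Chars.find_nonneg_iff _ _).mpr hinf
    obtain ⟨hpre, hmin⟩ := PySem.Chars.find_spec h0
    have hz : (PySem.Chars.find (w :: ws) [w]).toNat = 0 := by
      by_contra h
      exact hmin 0 (Nat.pos_of_ne_zero h) (by simp [(pv_singleton_prefix w _).mpr ⟨ws, rfl⟩])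
    omega
  · rw [if_neg hwc]
    by_cases hf : PySem.Chars.find ws [c] = -1
    · rw [if_pos hf]
      rw [PySem.Chars.find_eq_neg_one_iff]
      intro h
      have hmem : c ∈ w :: ws := (pv_mem_iff_infix c _).mpr h
      rcases List.mem_cons.mp hmem with h1 | h2
      · exact hwc h1.symm
      · exact ((PySem.Chars.find_eq_neg_one_iff _ _).mp hf) ((pv_mem_iff_infix c _).mp h2)
    · rw [if_neg hf]
      have hle := PySem.Chars.neg_one_le_find ws [c]
      have h0 : 0 ≤ PySem.Chars.find ws [c] := by omega
      obtain ⟨hpre, hmin⟩ := PySem.Chars.find_spec h0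
      have hmemws : c ∈ ws :=
        List.mem_of_mem_drop (List.singleton_sublist.mp hpre.sublist)
      have hF0 : 0 ≤ PySem.Chars.find (w :: ws) [c] :=
        (PySem.Chars.find_nonneg_iff _ _).mpr ((pv_mem_iff_infix c _).mp (List.mem_cons_of_mem w hmemws))
      obtain ⟨Hpre, Hmin⟩ := PySem.Chars.find_spec hF0
      have hFz : (PySem.Chars.find (w :: ws) [c]).toNat ≠ 0 := by
        intro h
        rw [h] at Hpre
        simp at Hpre
        exact hwc Hpre.symm
      obtain ⟨j, hj⟩ : ∃ j, (PySem.Chars.find (w :: ws) [c]).toNat = j + 1 :=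
        ⟨_, (Nat.succ_pred_eq_of_pos (Nat.pos_of_ne_zero hFz)).symm⟩
      rw [hj, List.drop_succ_cons] at Hpre
      have hge : (PySem.Chars.find ws [c]).toNat ≤ j := by
        by_contra h
        exact hmin j (by omega) Hpre
      have hle2 : j ≤ (PySem.Chars.find ws [c]).toNat := by
        by_contra h
        have := Hmin ((PySem.Chars.find ws [c]).toNat + 1) (by omega)
        rw [List.drop_succ_cons] at this
        exact this hpre
      omega

-- one step of A's loop on a nonempty word has exactly the two-pointer shape
lemma pv_aLoop_cons (w c : Char) (ws ls : List Char) (n : Int) :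
    pvALoop (w :: ws) n (c :: ls) =
      if w = c then pvALoop ws (n - 1) ls else pvALoop ws n (c :: ls) := by
  rw [pvALoop, pv_find_singleton_cons]
  by_cases hwc : w = c
  · rw [if_pos hwc, if_neg (show ¬((0:Int) < 0) by decide)]
    norm_num
    rw [PySem.List.slice_from_one]
    simp [hwc]
  · rw [if_neg hwc]
    by_cases hf : PySem.Chars.find ws [c] = -1
    · rw [if_pos hf, if_pos (show (-1:Int) < 0 by decide), pvALoop, hf,
        if_pos (show (-1:Int) < 0 by decide)]
      simp [hwc]
    · have hle := PySem.Chars.neg_one_le_find ws [c]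
      rw [if_neg hf, if_neg (by omega), pvALoop, if_neg (by omega)]
      rw [PySem.List.slice_from (w :: ws) (by omega), PySem.List.slice_from ws (by omega)]
      have h2 : (PySem.Chars.find ws [c] + 1 + 1).toNat = (PySem.Chars.find ws [c] + 1).toNat + 1 := by
        omega
      rw [h2, List.drop_succ_cons, if_neg (by omega)]

-- invariant: the loop ends with count = n - |ls| iff the scan succeeds, and strictly above otherwise
lemma pv_main : ∀ (temp ls : List Char) (n : Int),
    (pvIsSubseq ls temp = true → pvALoop temp n ls = n - ls.length) ∧
    (pvIsSubseq ls temp = false → n - ls.length < pvALoop temp n ls) := by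
  intro temp
  induction temp with
  | nil =>
    intro ls n
    cases ls with
    | nil => simp [pvIsSubseq, pvALoop]
    | cons c ls' =>
      have hfind : PySem.Chars.find ([] : List Char) [c] = -1 := by
        rw [PySem.Chars.find_eq_neg_one_iff]
        intro h
        simpa using (pv_mem_iff_infix c []).mpr h
      refine ⟨fun h => by simp [pvIsSubseq] at h, fun _ => ?_⟩
      rw [pvALoop, hfind, if_pos (show (-1:Int) < 0 by decide)]
      simp only [List.length_cons]
      push_cast
      have : (0:Int) ≤ (ls' : List Char).length := by positivity
      omega
  | cons w ws ih =>
    intro ls n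
    cases ls with
    | nil => simp [pvIsSubseq, pvALoop]
    | cons c ls' =>
      rw [pv_aLoop_cons]
      by_cases hwc : w = c
      · rw [if_pos hwc]
        have hsub : pvIsSubseq (c :: ls') (w :: ws) = pvIsSubseq ls' ws := by
          rw [pvIsSubseq, if_pos hwc]
        rw [hsub]
        obtain ⟨h1, h2⟩ := ih ls' (n - 1)
        refine ⟨fun h => ?_, fun h => ?_⟩
        · rw [h1 h]; simp only [List.length_cons]; push_cast; ring
        · have := h2 h; simp only [List.length_cons]; push_cast; omega
      · rw [if_neg hwc]
        have hsub : pvIsSubseq (c :: ls') (w :: ws) = pvIsSubseq (c :: ls') ws := by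
          rw [pvIsSubseq, if_neg hwc]
        rw [hsub]
        exact ih (c :: ls') n

-- A's per-word test agrees with the reference predicate
lemma pv_cond (word : String) (letters : String) :
    (pvALoop word.toList (PySem.Str.len letters) letters.toList = 0)
      ↔ pvIsSubseq letters.toList word.toList = true := by
  obtain ⟨h1, h2⟩ := pv_main word.toList letters.toList (letters.toList.length : Int)
  have hlen : PySem.Str.len letters = (letters.toList.length : Int) := by
    simp [PySem.Str.len_eq]
  rw [hlen]
  constructor
  · intro h
    cases hb : pvIsSubseq letters.toList word.toList with
    | true => rfl
    | false => have := h2 hb; omega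
  · intro h; rw [h1 h]; omega

-- ---------- B-side ----------

-- the occurrence list the dict stores under c
def pvOcc (c : Char) (w : List Char) : List Int :=
  ((PySem.List.enumerate w).filter (fun p => p.2 == c)).map (·.1)

lemma pv_getD_buildPos (w : List Char) (c : Char) :
    (pvBuildPos w).getD c [] = pvOcc c w := by
  have hmap : pvBuildPos w =
      ((PySem.List.enumerate w).map (fun p => (p.2, p.1))).foldl
        (fun d p => d.modify p.1 [] (· ++ [p.2])) PySem.Dict.empty := by
    rw [List.foldl_map]; rfl
  rw [hmap, PySem.Dict.getD_foldl_modify_append, PySem.Dict.getD_empty]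
  rw [List.filter_map, List.map_map]
  simp [pvOcc, Function.comp_def]

lemma pv_occ_mem (c : Char) (w : List Char) (j : Int) :
    j ∈ pvOcc c w ↔ ∃ (k : Nat), ∃ (hk : k < w.length), j = (k : Int) ∧ w[k] = c := by
  unfold pvOcc
  simp only [List.mem_map, List.mem_filter]
  constructor
  · rintro ⟨p, ⟨hmem, heq⟩, rfl⟩
    obtain ⟨k, hk, rfl⟩ := (PySem.List.mem_enumerate_iff _ _ _).mp hmem
    exact ⟨k, hk, by simpa using (beq_iff_eq.mp heq)⟩
  · rintro ⟨k, hk, rfl, hc⟩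
    exact ⟨((k : Int), w[k]), ⟨(PySem.List.mem_enumerate_iff _ _ _).mpr ⟨k, hk, by simp⟩,
      by simpa using hc⟩, rfl⟩

lemma pv_occ_sorted (c : Char) (w : List Char) : (pvOcc c w).Pairwise (· < ·) := by
  unfold pvOcc
  exact ((PySem.List.pairwise_lt_enumerate w 0).filter _).map _ (fun _ _ h => h)

-- binary-search invariant for Source B's hand-written loop (its indices stay in range,
-- everything left of the result is < v, everything from the result up to hi is ≥ v)
lemma pv_bisect_loop (idx : List Int) (v : Int) (hs : idx.Pairwise (· ≤ ·)) :
    ∀ (n lo hi : Nat), hi - lo = n → hi ≤ idx.length → lo ≤ hi →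
      lo ≤ pvBisect idx v lo hi ∧ pvBisect idx v lo hi ≤ hi ∧
      (∀ (j : Nat) (hj : j < idx.length), lo ≤ j → j < pvBisect idx v lo hi → idx[j] < v) ∧
      (∀ (j : Nat) (hj : j < idx.length), pvBisect idx v lo hi ≤ j → j < hi → v ≤ idx[j]) := by
  have hmono : ∀ (i j : Nat) (hi : i < idx.length) (hj : j < idx.length), i ≤ j → idx[i] ≤ idx[j] := by
    intro i j hi hj hij
    rcases Nat.lt_or_ge i j with h | h
    · exact (List.pairwise_iff_getElem.mp hs) i j hi hj h
    · have : i = j := by omega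
      subst this; exact le_refl _
  intro n
  induction n using Nat.strong_induction_on with
  | _ n ih =>
    intro lo hi hn hhi hlh
    rw [pvBisect]
    by_cases h : lo < hi
    · rw [if_pos h]
      have hmidlt : (lo + hi) / 2 < hi := by omega
      have hmidge : lo ≤ (lo + hi) / 2 := by omega
      have hmidlen : (lo + hi) / 2 < idx.length := by omega
      have hgd : idx.getD ((lo + hi) / 2) 0 = idx[(lo + hi) / 2] :=
        List.getD_eq_getElem idx 0 hmidlen
      by_cases hv : idx.getD ((lo + hi) / 2) 0 < v
      · rw [if_pos hv]
        obtain ⟨i1, i2, i3, i4⟩ := ih (hi - ((lo + hi) / 2 + 1)) (by omega) ((lo + hi) / 2 + 1) hi rfl hhi (by omega)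
        refine ⟨by omega, i2, ?_, i4⟩
        intro j hj hlo hlt
        rcases Nat.lt_or_ge j ((lo + hi) / 2 + 1) with hcase | hcase
        · calc idx[j] ≤ idx[(lo + hi) / 2] := hmono j _ hj hmidlen (by omega)
            _ < v := by rw [← hgd]; exact hv
        · exact i3 j hj hcase hlt
      · rw [if_neg hv]
        obtain ⟨i1, i2, i3, i4⟩ := ih ((lo + hi) / 2 - lo) (by omega) lo ((lo + hi) / 2) rfl (by omega) (by omega)
        refine ⟨i1, by omega, i3, ?_⟩
        intro j hj hge hlt
        rcases Nat.lt_or_ge j ((lo + hi) / 2) with hcase | hcase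
        · exact i4 j hj hge hcase
        · calc v ≤ idx[(lo + hi) / 2] := by rw [← hgd]; omega
            _ ≤ idx[j] := hmono _ j hmidlen hj hcase
    · rw [if_neg h]
      exact ⟨le_refl _, by omega, fun j _ h1 h2 => by omega, fun j _ h1 h2 => by omega⟩

-- every element of a (<)-sorted nonempty list is at most its last element
lemma pv_le_getLast (l : List Int) (hs : l.Pairwise (· < ·)) (x : Int) (hx : x ∈ l)
    (hne : l ≠ []) : x ≤ l.getLast hne := by
  obtain ⟨i, hi, rfl⟩ := List.mem_iff_getElem.mp hx
  rw [List.getLast_eq_getElem]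
  rcases Nat.lt_or_ge i (l.length - 1) with h | h
  · exact le_of_lt ((List.pairwise_iff_getElem.mp hs) i (l.length - 1) hi (by omega) h)
  · have : i = l.length - 1 := by omega
    subst this; exact le_refl _

-- reference-predicate facts
lemma pv_subseq_not_mem (c : Char) (ls t : List Char) (h : c ∉ t) :
    pvIsSubseq (c :: ls) t = false := by
  induction t with
  | nil => rfl
  | cons x xs ih =>
    rw [pvIsSubseq, if_neg (by intro he; subst he; exact h List.mem_cons_self)]
    exact ih (fun hm => h (List.mem_cons_of_mem x hm))

-- skipping to the first occurrence at or after a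
lemma pv_subseq_step (c : Char) (ls w : List Char) (k : Nat) (hk : k < w.length) (hc : w[k] = c) :
    ∀ (m a : Nat), k - a = m → a ≤ k → (∀ (k' : Nat) (hk' : k' < w.length), a ≤ k' → k' < k → w[k'] ≠ c) →
      pvIsSubseq (c :: ls) (w.drop a) = pvIsSubseq ls (w.drop (k + 1)) := by
  intro m
  induction m using Nat.strong_induction_on with
  | _ m ih =>
    intro a hm ha hnone
    have halen : a < w.length := by omega
    rw [List.drop_eq_getElem_cons halen, pvIsSubseq]
    rcases Nat.lt_or_ge a k with hlt | hge
    · rw [if_neg (fun he => hnone a halen (le_refl _) hlt he)]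
      exact ih (k - (a + 1)) (by omega) (a + 1) rfl (by omega)
        (fun k' h1 h2 h3 => hnone k' h1 (by omega) h3)
    · have : a = k := by omega
      subst this
      rw [if_pos hc]

-- Source B's per-word loop agrees with the reference predicate on the remaining suffix
lemma pv_bloop (w : List Char) : ∀ (ls : List Char) (nxt : Int), 0 ≤ nxt →
    pvBLoop (pvBuildPos w) nxt ls = pvIsSubseq ls (w.drop nxt.toNat) := by
  intro ls
  induction ls with
  | nil => intro nxt _; simp [pvBLoop, pvIsSubseq]
  | cons c ls ih =>
    intro nxt hnxt
    rw [pvBLoop]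
    simp only [pv_getD_buildPos]
    have hsortedLt := pv_occ_sorted c w
    have hsortedLe : (pvOcc c w).Pairwise (· ≤ ·) := hsortedLt.imp le_of_lt
    by_cases hex : ∃ j ∈ pvOcc c w, nxt ≤ j
    · obtain ⟨j0, hj0mem, hj0ge⟩ := hex
      have hne : pvOcc c w ≠ [] := List.ne_nil_of_mem hj0mem
      have hlast : PySem.List.pyGetD (pvOcc c w) (-1) 0 = (pvOcc c w).getLast hne :=
        PySem.List.pyGetD_neg_one (pvOcc c w) 0 hne
      have hlastge : nxt ≤ (pvOcc c w).getLast hne :=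
        le_trans hj0ge (pv_le_getLast _ hsortedLt j0 hj0mem hne)
      rw [if_neg (by rw [hlast]; push_neg; exact ⟨hne, by omega⟩)]
      obtain ⟨b1, b2, b3, b4⟩ := pv_bisect_loop (pvOcc c w) nxt hsortedLe
        ((pvOcc c w).length - 0) 0 (pvOcc c w).length rfl (le_refl _) (by omega)
      set lo := pvBisect (pvOcc c w) nxt 0 (pvOcc c w).length with hlo
      -- lo < length: otherwise every element is < nxt, contradicting j0
      have hlolen : lo < (pvOcc c w).length := by
        by_contra hcon
        obtain ⟨i0, hi0, rfl⟩ := List.mem_iff_getElem.mp hj0mem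
        have := b3 i0 hi0 (by omega) (by omega)
        omega
      have hgd : (pvOcc c w).getD lo 0 = (pvOcc c w)[lo] := List.getD_eq_getElem _ 0 hlolen
      have hmge : nxt ≤ (pvOcc c w)[lo] := b4 lo hlolen (le_refl _) hlolen
      obtain ⟨k, hk, hkeq, hkc⟩ := (pv_occ_mem c w _).mp (List.getElem_mem hlolen)
      -- minimality: no occurrence of c in w between nxt.toNat and k
      have hmin : ∀ (k' : Nat) (hk' : k' < w.length), nxt.toNat ≤ k' → k' < k → w[k'] ≠ c := by
        intro k' hk' hge' hlt' hc'
        have hmem' : ((k' : Int)) ∈ pvOcc c w := (pv_occ_mem c w _).mpr ⟨k', hk', rfl, hc'⟩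
        obtain ⟨i', hi', hieq⟩ := List.mem_iff_getElem.mp hmem'
        rcases Nat.lt_or_ge i' lo with hcase | hcase
        · have := b3 i' hi' (by omega) hcase
          omega
        · have := (List.pairwise_iff_getElem.mp hsortedLe) lo i'
          rcases Nat.lt_or_ge lo i' with h2 | h2
          · have := this hlolen hi' h2
            omega
          · have : i' = lo := by omega
            subst this
            omega
      rw [hgd, hkeq, ih ((k : Int) + 1) (by omega)]
      have htoNat : ((k : Int) + 1).toNat = k + 1 := by omega
      rw [htoNat]
      exact (pv_subseq_step c ls w k hk hkc (k - nxt.toNat) nxt.toNat rfl (by omega) hmin).symm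
    · push_neg at hex
      -- every occurrence is < nxt: the guard fires and c is absent from the suffix
      have hguard : pvOcc c w = [] ∨ PySem.List.pyGetD (pvOcc c w) (-1) 0 < nxt := by
        rcases List.eq_nil_or_concat (pvOcc c w) with hnil | ⟨l', x, hcat⟩
        · exact Or.inl hnil
        · refine Or.inr ?_
          have hne : pvOcc c w ≠ [] := by rw [hcat]; simp
          rw [PySem.List.pyGetD_neg_one (pvOcc c w) 0 hne]
          exact hex _ (List.getLast_mem hne)
      rw [if_pos hguard]
      have hnotmem : c ∉ w.drop nxt.toNat := by
        intro hmem
        obtain ⟨i, hi, hieq⟩ := List.mem_iff_getElem.mp hmem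
        rw [List.getElem_drop] at hieq
        have hi' : nxt.toNat + i < w.length := by
          have := hi; simp [List.length_drop] at this; omega
        have hmem' : ((nxt.toNat + i : Nat) : Int) ∈ pvOcc c w :=
          (pv_occ_mem c w _).mpr ⟨nxt.toNat + i, hi', rfl, hieq⟩
        have := hex _ hmem'
        omega
      exact (pv_subseq_not_mem c ls _ hnotmem).symm

-- B's per-word test agrees with the reference predicate
lemma pv_cond_alt (word : String) (letters : String) :
    pvBLoop (pvBuildPos word.toList) 0 letters.toList = pvIsSubseq letters.toList word.toList := by
  have := pv_bloop word.toList letters.toList 0 (le_refl 0)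
  simpa using this

-- ===== VERDICT (by name: the statement is the Claim_ definition above) =====
theorem words_with_letters_spec : Claim_equal_words_with_letters := by
  intro words letters hD
  clear hD
  unfold Spec_words_with_letters words_with_letters words_with_letters_alt
  have : ∀ acc : List String,
      words.foldl (fun result word =>
        if pvALoop word.toList (PySem.Str.len letters) letters.toList = 0 then result ++ [word]
        else result) acc =
      words.foldl (fun result word =>
        if pvBLoop (pvBuildPos word.toList) 0 letters.toList then result ++ [word]
        else result) acc := by
    induction words with
    | nil => intro acc; rfl
    | cons w ws ih =>
      intro acc
      simp only [List.foldl_cons]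
      by_cases h : pvALoop w.toList (PySem.Str.len letters) letters.toList = 0
      · rw [if_pos h, if_pos (by rw [pv_cond_alt]; exact (pv_cond w letters).mp h), ih]
      · rw [if_neg h, if_neg (by rw [pv_cond_alt]; simpa using fun hc => h ((pv_cond w letters).mpr hc)), ih]
  exact this []
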